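-- pv_equiv track=rewrite | github.com/pypi-data/pypi-mirror-353 | packages/i2net/i2net-2.0.0.tar.gz/i2net-2.0.0/src/I2NeT/decoder.py | calculate_expected_float_count
-- ===== SOURCE A (Python) =====
-- def calculate_expected_float_count(original_types):
--     float_count = 0
--     for data_type in original_types:
--         if data_type == "IP Address":
--             float_count += 4  # 4 octets
--         elif data_type == "MAC Address":
--             float_count += 2  # 2 chunks of 3 bytes each
--         else:  # Integer, Float, String
--             float_count += 1
--     return float_count
-- ===== SOURCE B (Python) =====
-- def calculate_expected_float_count(original_types):
--     return (len(original_types)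
--             + 3 * original_types.count("IP Address")
--             + original_types.count("MAC Address"))
-- ===== Notes on version B (the rewrite author's own statement) =====
-- stated objective: simpler
-- what changed: Replaced the per-element branching accumulation loop by a closed-form arithmetic expression over category counts: len + 3*count('IP Address') + count('MAC Address').
import Mathlib
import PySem

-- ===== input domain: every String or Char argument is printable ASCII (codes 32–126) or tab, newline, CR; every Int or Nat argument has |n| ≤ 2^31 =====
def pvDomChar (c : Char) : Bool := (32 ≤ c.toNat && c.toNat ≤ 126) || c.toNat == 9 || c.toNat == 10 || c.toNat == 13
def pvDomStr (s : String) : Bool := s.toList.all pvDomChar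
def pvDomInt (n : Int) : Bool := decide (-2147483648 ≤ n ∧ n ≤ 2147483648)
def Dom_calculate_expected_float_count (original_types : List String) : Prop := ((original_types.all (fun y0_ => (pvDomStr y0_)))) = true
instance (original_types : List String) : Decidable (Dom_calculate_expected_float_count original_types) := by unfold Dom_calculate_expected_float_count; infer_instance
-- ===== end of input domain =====

-- B replaces A's branching accumulation loop by a closed-form arithmetic of category counts (simpler).

-- ===== PORT A =====
-- loop with accumulator float_count, branch per element
def calculate_expected_float_count (original_types : List String) : Int :=
  original_types.foldl
    (fun float_count data_type =>
      if data_type = "IP Address" then float_count + 4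
      else if data_type = "MAC Address" then float_count + 2
      else float_count + 1)
    0

-- ===== PORT B =====
-- len + 3*count("IP Address") + count("MAC Address")
def calculate_expected_float_count_alt (original_types : List String) : Int :=
  (original_types.length : Int)
    + 3 * (PySem.List.count original_types "IP Address")
    + (PySem.List.count original_types "MAC Address")

-- ===== PRECONDITION & SPEC =====
def Spec_calculate_expected_float_count (original_types : List String) (out : Int) : Prop := out = calculate_expected_float_count_alt original_types
instance (original_types : List String) (out : Int) : Decidable (Spec_calculate_expected_float_count original_types out) := by unfold Spec_calculate_expected_float_count; infer_instance

-- ===== CLAIM (what is proved, stated in full; the proofs are below) =====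
def Claim_equal_calculate_expected_float_count : Prop := ∀ (original_types : List String), Dom_calculate_expected_float_count original_types → Spec_calculate_expected_float_count original_types (calculate_expected_float_count original_types)

-- ===== LEMMAS AND PROOFS =====

theorem pv_foldl_shift (l : List String) (c : Int) :
    l.foldl
      (fun float_count data_type =>
        if data_type = "IP Address" then float_count + 4
        else if data_type = "MAC Address" then float_count + 2
        else float_count + 1)
      c
    = c + calculate_expected_float_count_alt l := by
  induction l generalizing c with
  | nil => simp [calculate_expected_float_count_alt, PySem.List.count]
  | cons h t ih =>
    simp only [List.foldl_cons]
    rw [ih]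
    by_cases h1 : h = "IP Address"
    · subst h1
      simp [calculate_expected_float_count_alt, PySem.List.count, List.count_cons]
      push_cast; ring
    · by_cases h2 : h = "MAC Address"
      · subst h2
        simp [calculate_expected_float_count_alt, PySem.List.count, List.count_cons, h1]
        push_cast; ring
      · simp [calculate_expected_float_count_alt, PySem.List.count, List.count_cons, h1, h2]
        push_cast; ring

-- ===== VERDICT (by name: the statement is the Claim_ definition above) =====
theorem calculate_expected_float_count_spec : Claim_equal_calculate_expected_float_count := by
  intro l _
  unfold Spec_calculate_expected_float_count calculate_expected_float_count
  rw [pv_foldl_shift]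
  ring
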